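-- pv_equiv track=rewrite | github.com/Zyver-Meeps/resources | sushi-huh/src/il_cuore/lib/sushi_huh_VersionSystem.py | version2vector
-- ===== SOURCE A (Python) =====
-- def version2vector(version=''):
--     vector = []
--     digs = ''
--     alps = ''
--
--     for c in version:
--         if c.isdigit():
--             digs += c
--
--             if alps != '':
--                 vector += [alps]
--                 alps = ''
--         elif c.isalpha():
--             alps += c
--
--             if digs != '':
--                 vector += [digs]
--                 digs = ''
--         else:
--             if digs != '':
--                 vector += [digs]
--                 digs = ''
--
--             if alps != '':
--                 vector += [alps]
--                 alps = ''
--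
--     if digs != '':
--         vector += [digs]
--         digs = ''
--
--     if alps != '':
--         vector += [alps]
--         alps = ''
--
--     return vector
-- ===== SOURCE B (Python) =====
-- def version2vector(version=''):
--     def cls(c):
--         return 'd' if c.isdigit() else 'a' if c.isalpha() else 'o'
--     out = []
--     i, n = 0, len(version)
--     while i < n:
--         k = cls(version[i])
--         j = i + 1
--         while j < n and cls(version[j]) == k:
--             j += 1
--         if k != 'o':
--             out.append(version[i:j])
--         i = j
--     return out
-- ===== Notes on version B (the rewrite author's own statement) =====
-- stated objective: simpler
-- what changed: A's two flush-on-transition buffers (digs/alps) with duplicated flushing logic are replaced by a single two-pointer span scan that finds each maximal same-class (digit/letter/other) run and emits it unless it is a separator run.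
import Mathlib
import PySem

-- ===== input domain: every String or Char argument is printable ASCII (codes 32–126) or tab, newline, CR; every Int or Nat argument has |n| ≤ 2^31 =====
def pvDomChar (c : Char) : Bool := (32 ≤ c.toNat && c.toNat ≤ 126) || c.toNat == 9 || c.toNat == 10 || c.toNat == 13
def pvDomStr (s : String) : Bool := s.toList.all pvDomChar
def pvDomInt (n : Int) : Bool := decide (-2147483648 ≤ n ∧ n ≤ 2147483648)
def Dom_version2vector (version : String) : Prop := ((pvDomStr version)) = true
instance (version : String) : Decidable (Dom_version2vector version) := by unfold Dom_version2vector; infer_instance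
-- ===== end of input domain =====

-- B replaces A's two flush-on-transition buffers by a single two-pointer span scan
-- (find each maximal same-class run, emit it unless it is a separator run): simpler.

-- ===== PORT A =====
-- A's loop state: (vector, digs, alps); each step is A's branch structure verbatim.
def pvStepA (st : List String × List Char × List Char) (c : Char) :
    List String × List Char × List Char :=
  let (vector, digs, alps) := st
  if PySem.Chars.isdigit c then
    let digs := digs ++ [c]
    if alps ≠ [] then (vector ++ [String.ofList alps], digs, []) else (vector, digs, alps)
  else if PySem.Chars.isalpha c then
    let alps := alps ++ [c]
    if digs ≠ [] then (vector ++ [String.ofList digs], [], alps) else (vector, digs, alps)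
  else
    let (vector, digs) :=
      if digs ≠ [] then (vector ++ [String.ofList digs], ([] : List Char)) else (vector, digs)
    if alps ≠ [] then (vector ++ [String.ofList alps], digs, []) else (vector, digs, alps)

-- the two trailing flushes after the loop
def pvFinishA (st : List String × List Char × List Char) : List String :=
  let (vector, digs, alps) := st
  let vector := if digs ≠ [] then vector ++ [String.ofList digs] else vector
  if alps ≠ [] then vector ++ [String.ofList alps] else vector

def version2vector (version : String) : List String :=
  pvFinishA (version.toList.foldl pvStepA ([], [], []))

-- ===== PORT B =====
-- class label of a character: 'd' digit, 'a' letter, 'o' other (digit checked first, as in B)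
def pvCls (c : Char) : Char :=
  if PySem.Chars.isdigit c then 'd' else if PySem.Chars.isalpha c then 'a' else 'o'

-- B's span scan: the inner `while j < n and cls(version[j]) == k` is the takeWhile/dropWhile
-- of the same-class run starting at i; `version[i:j]` is the run itself.
def pvSpans (cs : List Char) : List String :=
  match cs with
  | [] => []
  | c :: rest =>
    let k := pvCls c
    let run := rest.takeWhile (fun x => pvCls x == k)
    let rest' := rest.dropWhile (fun x => pvCls x == k)
    if k == 'o' then pvSpans rest' else String.ofList (c :: run) :: pvSpans rest'
termination_by cs.length
decreasing_by
  all_goals simpa using Nat.lt_succ_of_le (List.length_dropWhile_le _ _)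

def version2vector_alt (version : String) : List String :=
  pvSpans version.toList

-- ===== PRECONDITION & SPEC =====
def Spec_version2vector (version : String) (out : List String) : Prop := out = version2vector_alt version
instance (version : String) (out : List String) : Decidable (Spec_version2vector version out) := by unfold Spec_version2vector; infer_instance

-- ===== CLAIM (what is proved, stated in full; the proofs are below) =====
def Claim_equal_version2vector : Prop := ∀ (version : String), Dom_version2vector version → Spec_version2vector version (version2vector version)

-- ===== LEMMAS AND PROOFS =====

theorem pvSpans_dropWhile_o (cs : List Char) :
    pvSpans (cs.dropWhile (fun x => pvCls x == 'o')) = pvSpans cs := by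
  match cs with
  | [] => rfl
  | c :: cs' =>
    by_cases h : pvCls c = 'o'
    · rw [List.dropWhile_cons_of_pos (by simp [h])]
      conv_rhs => rw [pvSpans]
      simp [h]
    · rw [List.dropWhile_cons_of_neg (by simp [h])]

-- The combined loop invariant: pending-empty, pending-digits and pending-letters states.
theorem pvMain (n : Nat) : ∀ cs : List Char, cs.length ≤ n →
    (∀ vec : List String,
      pvFinishA (cs.foldl pvStepA (vec, [], [])) = vec ++ pvSpans cs) ∧
    (∀ vec : List String, ∀ digs : List Char, digs ≠ [] →
      pvFinishA (cs.foldl pvStepA (vec, digs, [])) =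
        vec ++ (String.ofList (digs ++ cs.takeWhile (fun x => pvCls x == 'd')) ::
          pvSpans (cs.dropWhile (fun x => pvCls x == 'd')))) ∧
    (∀ vec : List String, ∀ alps : List Char, alps ≠ [] →
      pvFinishA (cs.foldl pvStepA (vec, [], alps)) =
        vec ++ (String.ofList (alps ++ cs.takeWhile (fun x => pvCls x == 'a')) ::
          pvSpans (cs.dropWhile (fun x => pvCls x == 'a')))) := by
  induction n with
  | zero =>
    intro cs hlen
    have : cs = [] := List.eq_nil_of_length_eq_zero (Nat.le_zero.mp hlen)
    subst this
    refine ⟨fun vec => by simp [pvFinishA, pvSpans],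
            fun vec digs hd => by simp [pvFinishA, pvSpans, hd],
            fun vec alps ha => by simp [pvFinishA, pvSpans, ha]⟩
  | succ n ih =>
    intro cs hlen
    match cs with
    | [] =>
      refine ⟨fun vec => by simp [pvFinishA, pvSpans],
              fun vec digs hd => by simp [pvFinishA, pvSpans, hd],
              fun vec alps ha => by simp [pvFinishA, pvSpans, ha]⟩
    | c :: cs' =>
      have hlen' : cs'.length ≤ n := Nat.lt_succ_iff.mp (by simpa using hlen)
      obtain ⟨ih0, ihd, iha⟩ := ih cs' hlen'
      by_cases hd : PySem.Chars.isdigit c = true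
      · -- c is a digit: pvCls c = 'd'
        have hcls : pvCls c = 'd' := by simp [pvCls, hd]
        refine ⟨?_, ?_, ?_⟩
        · intro vec
          rw [List.foldl_cons]
          have hstep : pvStepA (vec, [], []) c = (vec, [c], []) := by
            simp [pvStepA, hd]
          rw [hstep, ihd vec [c] (by simp)]
          conv_rhs => rw [pvSpans]
          simp [hcls]
        · intro vec digs hdne
          rw [List.foldl_cons]
          have hstep : pvStepA (vec, digs, []) c = (vec, digs ++ [c], []) := by
            simp [pvStepA, hd]
          rw [hstep, ihd vec (digs ++ [c]) (by simp)]
          rw [List.takeWhile_cons_of_pos (by simp [hcls]),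
              List.dropWhile_cons_of_pos (by simp [hcls])]
          simp
        · intro vec alps hane
          rw [List.foldl_cons]
          have hstep : pvStepA (vec, [], alps) c = (vec ++ [String.ofList alps], [c], []) := by
            simp [pvStepA, hd, hane]
          rw [hstep, ihd _ [c] (by simp)]
          rw [List.takeWhile_cons_of_neg (by simp [hcls]),
              List.dropWhile_cons_of_neg (by simp [hcls])]
          conv_rhs => rw [pvSpans]
          simp [hcls]
      · by_cases ha : PySem.Chars.isalpha c = true
        · -- c is a letter: pvCls c = 'a'
          have hcls : pvCls c = 'a' := by simp [pvCls, hd, ha]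
          refine ⟨?_, ?_, ?_⟩
          · intro vec
            rw [List.foldl_cons]
            have hstep : pvStepA (vec, [], []) c = (vec, [], [c]) := by
              simp [pvStepA, hd, ha]
            rw [hstep, iha vec [c] (by simp)]
            conv_rhs => rw [pvSpans]
            simp [hcls]
          · intro vec digs hdne
            rw [List.foldl_cons]
            have hstep : pvStepA (vec, digs, []) c = (vec ++ [String.ofList digs], [], [c]) := by
              simp [pvStepA, hd, ha, hdne]
            rw [hstep, iha _ [c] (by simp)]
            rw [List.takeWhile_cons_of_neg (by simp [hcls]),
                List.dropWhile_cons_of_neg (by simp [hcls])]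
            conv_rhs => rw [pvSpans]
            simp [hcls]
          · intro vec alps hane
            rw [List.foldl_cons]
            have hstep : pvStepA (vec, [], alps) c = (vec, [], alps ++ [c]) := by
              simp [pvStepA, hd, ha]
            rw [hstep, iha vec (alps ++ [c]) (by simp)]
            rw [List.takeWhile_cons_of_pos (by simp [hcls]),
                List.dropWhile_cons_of_pos (by simp [hcls])]
            simp
        · -- separator: pvCls c = 'o'
          have hcls : pvCls c = 'o' := by simp [pvCls, hd, ha]
          refine ⟨?_, ?_, ?_⟩
          · intro vec
            rw [List.foldl_cons]
            have hstep : pvStepA (vec, [], []) c = (vec, [], []) := by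
              simp [pvStepA, hd, ha]
            rw [hstep, ih0 vec]
            conv_rhs => rw [pvSpans]
            rw [← pvSpans_dropWhile_o cs']
            simp [hcls]
          · intro vec digs hdne
            rw [List.foldl_cons]
            have hstep : pvStepA (vec, digs, []) c = (vec ++ [String.ofList digs], [], []) := by
              simp [pvStepA, hd, ha, hdne]
            rw [hstep, ih0 _]
            rw [List.takeWhile_cons_of_neg (by simp [hcls]),
                List.dropWhile_cons_of_neg (by simp [hcls])]
            conv_rhs => rw [pvSpans]
            rw [← pvSpans_dropWhile_o cs']
            simp [hcls]
          · intro vec alps hane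
            rw [List.foldl_cons]
            have hstep : pvStepA (vec, [], alps) c = (vec ++ [String.ofList alps], [], []) := by
              simp [pvStepA, hd, ha, hane]
            rw [hstep, ih0 _]
            rw [List.takeWhile_cons_of_neg (by simp [hcls]),
                List.dropWhile_cons_of_neg (by simp [hcls])]
            conv_rhs => rw [pvSpans]
            rw [← pvSpans_dropWhile_o cs']
            simp [hcls]

-- ===== VERDICT (by name: the statement is the Claim_ definition above) =====
theorem version2vector_spec : Claim_equal_version2vector := by
  intro version _
  unfold Spec_version2vector version2vector version2vector_alt
  simpa using (pvMain version.toList.length version.toList le_rfl).1 []
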